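-- pv_equiv track=rewrite | github.com/zer0-kr/security-framework-mcp | src/security_framework_mcp/db.py | _tokenize_query
-- ===== SOURCE A (Python) =====
-- def _tokenize_query(query: str) -> list[str]:
--     tokens: list[str] = []
--     i = 0
--     while i < len(query):
--         if query[i] == '"':
--             end = query.find('"', i + 1)
--             if end == -1:
--                 end = len(query)
--             else:
--                 end += 1
--             tokens.append(query[i:end])
--             i = end
--         elif query[i].isspace():
--             i += 1
--         else:
--             end = i
--             while end < len(query) and not query[end].isspace() and query[end] != '"':
--                 end += 1
--             tokens.append(query[i:end])
--             i = end
--     return tokens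
-- ===== SOURCE B (Python) =====
-- def _tokenize_query(query: str) -> list[str]:
--     tokens: list[str] = []
--     buf: list[str] = []
--     mode = 0  # 0 = outside, 1 = inside quotes, 2 = inside a word
--     for ch in query:
--         if mode == 1:
--             buf.append(ch)
--             if ch == '"':
--                 tokens.append(''.join(buf))
--                 buf = []
--                 mode = 0
--         elif mode == 2:
--             if ch == '"':
--                 tokens.append(''.join(buf))
--                 buf = ['"']
--                 mode = 1
--             elif ch.isspace():
--                 tokens.append(''.join(buf))
--                 buf = []
--                 mode = 0
--             else:
--                 buf.append(ch)
--         else: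
--             if ch == '"':
--                 buf = ['"']
--                 mode = 1
--             elif not ch.isspace():
--                 buf = [ch]
--                 mode = 2
--     if mode != 0:
--         tokens.append(''.join(buf))
--     return tokens
-- ===== Notes on version B (the rewrite author's own statement) =====
-- stated objective: faster
-- what changed: A jumps indices with str.find, slicing and an inner index scan; B is a single character-by-character state machine (mode outside/in-quote/in-word plus a buffer) that never indexes or slices the string.
import Mathlib
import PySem

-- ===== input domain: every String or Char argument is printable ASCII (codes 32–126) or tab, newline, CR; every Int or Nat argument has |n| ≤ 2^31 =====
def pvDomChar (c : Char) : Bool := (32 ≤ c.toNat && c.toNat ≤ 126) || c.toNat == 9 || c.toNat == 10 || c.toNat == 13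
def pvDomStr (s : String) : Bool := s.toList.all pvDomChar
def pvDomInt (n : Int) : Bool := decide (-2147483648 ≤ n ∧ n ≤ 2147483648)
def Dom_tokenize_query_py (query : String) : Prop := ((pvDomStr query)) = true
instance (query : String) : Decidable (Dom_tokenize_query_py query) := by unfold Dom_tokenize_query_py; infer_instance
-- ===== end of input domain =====

-- B replaces A's index-jumping scan (str.find + inner index loop + slicing) by a single
-- character-by-character state machine (mode + buffer); same result, different decomposition.

-- ===== PORT A =====
-- inner 'while end < len(query) and not query[end].isspace() and query[end] != '"': end += 1'
def tokAword (cs : List Char) (e : Nat) : Nat :=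
  if h : e < cs.length then
    if ¬ (PySem.Chars.isspace cs[e]) = true ∧ cs[e] ≠ '"' then tokAword cs (e + 1) else e
  else e
termination_by cs.length - e

-- termination helper for the outer loop: the inner word scan moves forward
theorem tokAword_ge (cs : List Char) (e : Nat) : e ≤ tokAword cs e := by
  unfold tokAword
  split
  · split
    · exact Nat.le_of_succ_le (tokAword_ge cs (e + 1))
    · exact Nat.le_refl e
  · exact Nat.le_refl e
termination_by cs.length - e

-- termination helper: find('"', i+1) ≠ -1 points at or after i+1
theorem findFrom_succ_ge (cs : List Char) (i : Nat) (h : i < cs.length)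
    (hne : PySem.Chars.findFrom cs ['"'] ((i + 1 : Nat) : Int) none ≠ -1) :
    ((i + 1 : Nat) : Int) ≤ PySem.Chars.findFrom cs ['"'] ((i + 1 : Nat) : Int) none :=
  (PySem.Chars.findFrom_natCast_spec cs ['"'] (i + 1) (by omega) hne).1

-- outer 'while i < len(query)' loop of A, carrying (i, tokens)
def tokAloop (cs : List Char) (i : Nat) (tokens : List String) : List String :=
  if h : i < cs.length then
    if hq : cs[i] = '"' then
      let f := PySem.Chars.findFrom cs ['"'] ((i + 1 : Nat) : Int) none
      let e := if f = -1 then cs.length else f.toNat + 1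
      tokAloop cs e (tokens ++ [String.ofList (PySem.List.slice cs (some (i : Int)) (some (e : Int)))])
    else if hs : PySem.Chars.isspace cs[i] = true then
      tokAloop cs (i + 1) tokens
    else
      let e := tokAword cs i
      tokAloop cs e (tokens ++ [String.ofList (PySem.List.slice cs (some (i : Int)) (some (e : Int)))])
  else tokens
termination_by cs.length - i
decreasing_by
  · split
    · omega
    · rename_i hne
      have := findFrom_succ_ge cs i h hne
      omega
  · omega
  · have h1 : i + 1 ≤ tokAword cs (i + 1) := tokAword_ge cs (i + 1)
    have h2 : tokAword cs i = tokAword cs (i + 1) := by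
      rw [tokAword]
      simp only [h, dif_pos]
      rw [if_pos ⟨hs, hq⟩]
    omega

def tokenize_query_py (query : String) : List String :=
  tokAloop query.toList 0 []

-- ===== PORT B =====
-- one transition of the state machine: state = (mode, buf, tokens), mode 0 = outside, 1 = in quote, 2 = in word
def tokBstep (st : Nat × List Char × List String) (ch : Char) : Nat × List Char × List String :=
  match st with
  | (mode, buf, tokens) =>
    if mode = 1 then
      let buf2 := buf ++ [ch]
      if ch = '"' then (0, [], tokens ++ [String.ofList buf2]) else (1, buf2, tokens)
    else if mode = 2 then
      if ch = '"' then (1, ['"'], tokens ++ [String.ofList buf])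
      else if PySem.Chars.isspace ch = true then (0, [], tokens ++ [String.ofList buf])
      else (2, buf ++ [ch], tokens)
    else
      if ch = '"' then (1, ['"'], tokens)
      else if PySem.Chars.isspace ch = true then (0, [], tokens)
      else (2, [ch], tokens)

def tokenize_query_py_alt (query : String) : List String :=
  let st := query.toList.foldl tokBstep (0, [], [])
  if st.1 ≠ 0 then st.2.2 ++ [String.ofList st.2.1] else st.2.2

-- ===== PRECONDITION & SPEC =====
def Spec_tokenize_query_py (query : String) (out : List String) : Prop := out = tokenize_query_py_alt query
instance (query : String) (out : List String) : Decidable (Spec_tokenize_query_py query out) := by unfold Spec_tokenize_query_py; infer_instance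

-- ===== CLAIM (what is proved, stated in full; the proofs are below) =====
def Claim_equal_tokenize_query_py : Prop := ∀ (query : String), Dom_tokenize_query_py query → Spec_tokenize_query_py query (tokenize_query_py query)

-- ===== LEMMAS AND PROOFS =====

-- run B's machine on the remaining characters and apply the final flush
def finB (st : Nat × List Char × List String) (cs : List Char) : List String :=
  let r := cs.foldl tokBstep st
  if r.1 ≠ 0 then r.2.2 ++ [String.ofList r.2.1] else r.2.2

theorem foldl_mode1 (l : List Char) (b : List Char) (t : List String)
    (hl : ∀ ch ∈ l, ch ≠ '"') :
    l.foldl tokBstep (1, b, t) = (1, b ++ l, t) := by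
  induction l generalizing b with
  | nil => simp
  | cons c l ih =>
    have hc : c ≠ '"' := hl c (by simp)
    simp only [List.foldl_cons, tokBstep, reduceIte, if_neg hc]
    rw [ih (b ++ [c]) (fun ch h => hl ch (by simp [h]))]
    simp

theorem foldl_mode2 (l : List Char) (b : List Char) (t : List String)
    (hl : ∀ ch ∈ l, ¬ PySem.Chars.isspace ch = true ∧ ch ≠ '"') :
    l.foldl tokBstep (2, b, t) = (2, b ++ l, t) := by
  induction l generalizing b with
  | nil => simp
  | cons c l ih =>
    obtain ⟨hs, hc⟩ := hl c (by simp)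
    simp only [List.foldl_cons, tokBstep]
    norm_num
    rw [if_neg hc, if_neg hs]
    rw [ih (b ++ [c]) (fun ch h => hl ch (by simp [h]))]
    simp

theorem finB_cons (st : Nat × List Char × List String) (c : Char) (l : List Char) :
    finB st (c :: l) = finB (tokBstep st c) l := by
  simp [finB]

theorem finB_append (st : Nat × List Char × List String) (l1 l2 : List Char) :
    finB st (l1 ++ l2) = finB (l1.foldl tokBstep st) l2 := by
  simp [finB]

theorem singleton_prefix_drop (cs : List Char) (j : Nat) (hj : j < cs.length) (a : Char) :
    [a] <+: cs.drop j ↔ cs[j] = a := by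
  rw [List.drop_eq_getElem_cons hj, List.cons_prefix_cons]
  simp only [List.nil_prefix, and_true, eq_comm]

-- full characterisation of the inner word scan
theorem tokAword_spec (cs : List Char) (e : Nat) (he : e ≤ cs.length) :
    tokAword cs e ≤ cs.length ∧
    (∀ j (hj : j < cs.length), e ≤ j → j < tokAword cs e →
      ¬ PySem.Chars.isspace cs[j] = true ∧ cs[j] ≠ '"') ∧
    (∀ _ : tokAword cs e < cs.length,
      PySem.Chars.isspace cs[tokAword cs e]! = true ∨ cs[tokAword cs e]! = '"') := by
  rw [tokAword]
  split
  · rename_i h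
    split
    · rename_i hcond
      obtain ⟨h1, h2, h3⟩ := tokAword_spec cs (e + 1) h
      refine ⟨h1, ?_, h3⟩
      intro j hj hej hjlt
      rcases Nat.eq_or_lt_of_le hej with rfl | hlt'
      · exact hcond
      · exact h2 j hj hlt' hjlt
    · rename_i hcond
      refine ⟨he, fun j hj hej hjlt => by omega, fun hlt => ?_⟩
      by_cases hsp : PySem.Chars.isspace cs[e] = true
      · left; rw [getElem!_pos cs e h]; exact hsp
      · right; rw [getElem!_pos cs e h]; tauto
  · rename_i h
    exact ⟨by omega, fun j hj hej hjlt => by omega, fun hlt => by omega⟩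
termination_by cs.length - e

theorem tokAword_step (cs : List Char) (i : Nat) (h : i < cs.length)
    (hs : ¬ PySem.Chars.isspace cs[i] = true) (hq : cs[i] ≠ '"') :
    tokAword cs i = tokAword cs (i + 1) := by
  rw [tokAword]
  simp only [h, dif_pos]
  rw [if_pos ⟨hs, hq⟩]

theorem main_lemma (n : Nat) (cs : List Char) (i : Nat) (t : List String)
    (hn : cs.length - i ≤ n) :
    tokAloop cs i t = finB (0, [], t) (cs.drop i) := by
  induction n generalizing i t with
  | zero =>
    have hi : cs.length ≤ i := by omega
    rw [tokAloop, dif_neg (by omega), List.drop_eq_nil_of_le hi]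
    simp [finB]
  | succ n ih =>
    by_cases h : i < cs.length
    · have hdrop : cs.drop i = cs[i] :: cs.drop (i + 1) := List.drop_eq_getElem_cons h
      rw [tokAloop, dif_pos h]
      by_cases hq : cs[i] = '"'
      · rw [dif_pos hq]
        simp only []
        by_cases hfneg : PySem.Chars.findFrom cs ['"'] ((i + 1 : Nat) : Int) none = -1
        · -- no closing quote: token is the whole tail
          rw [if_pos hfneg]
          have hnoq : ∀ ch ∈ cs.drop (i + 1), ch ≠ '"' := by
            rw [PySem.Chars.findFrom_natCast_eq_neg_one_iff cs ['"'] (i + 1) (by omega)] at hfneg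
            intro ch hch rfl
            obtain ⟨s, u, hsu⟩ := List.append_of_mem hch
            exact hfneg ⟨s, u, by rw [hsu]; simp⟩
          have hsl : PySem.List.slice cs (some (i : Int)) (some (cs.length : Int)) = cs.drop i := by
            rw [PySem.List.slice_natCast]
            exact List.take_of_length_le (by simp)
          rw [hsl, tokAloop, dif_neg (by omega)]
          rw [hdrop, finB_cons]
          have hstep : tokBstep (0, [], t) '"' = (1, ['"'], t) := by simp [tokBstep]
          rw [hq, hstep]
          unfold finB
          rw [foldl_mode1 _ _ _ hnoq]
          simp
        · -- closing quote at p
          rw [if_neg hfneg]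
          obtain ⟨hge, hpre, hmin⟩ :=
            PySem.Chars.findFrom_natCast_spec cs ['"'] (i + 1) (by omega) hfneg
          set p := (PySem.Chars.findFrom cs ['"'] ((i + 1 : Nat) : Int) none).toNat with hp
          have hip : i + 1 ≤ p := by omega
          have hplen : p < cs.length := by
            have := hpre.length_le
            simp at this
            omega
          have hcp : cs[p] = '"' := (singleton_prefix_drop cs p hplen '"').mp hpre
          set m := p - (i + 1) with hm
          set mid := (cs.drop (i + 1)).take m with hmid
          have hmidlen : mid.length = m := by
            simp [hmid]
            omega
          have hmidq : ∀ ch ∈ mid, ch ≠ '"' := by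
            intro ch hch
            obtain ⟨j, hj, rfl⟩ := List.mem_iff_getElem.mp hch
            have hjm : j < m := by omega
            have h1 : mid[j] = cs[i + 1 + j]'(by omega) := by
              simp [hmid]
            rw [h1]
            intro hcontra
            exact hmin (i + 1 + j) (by omega) (by omega)
              ((singleton_prefix_drop cs (i + 1 + j) (by omega) '"').mpr hcontra)
          have hdec : cs.drop (i + 1) = mid ++ cs[p] :: cs.drop (p + 1) := by
            have h1 : mid ++ (cs.drop (i + 1)).drop m = cs.drop (i + 1) :=
              List.take_append_drop m _
            rw [List.drop_drop] at h1
            have h2 : i + 1 + m = p := by omega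
            rw [h2, List.drop_eq_getElem_cons hplen] at h1
            exact h1.symm
          have hsl : PySem.List.slice cs (some (i : Int)) (some ((p + 1 : Nat) : Int)) =
              '"' :: (mid ++ ['"']) := by
            rw [PySem.List.slice_natCast, hdrop, hdec]
            have hnum : p + 1 - i = m + 2 := by omega
            rw [hnum, List.take_succ_cons]
            have hnum2 : m + 1 = mid.length + 1 := by omega
            rw [hnum2, List.take_append, hq, hcp]
            simp
          rw [hsl]
          rw [hdrop, finB_cons]
          have hstep : tokBstep (0, [], t) '"' = (1, ['"'], t) := by simp [tokBstep]
          rw [hq, hstep, hdec, finB_append, foldl_mode1 _ _ _ hmidq]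
          simp only [List.singleton_append]
          rw [finB_cons]
          have hstep2 : tokBstep (1, '"' :: mid, t) cs[p] =
              (0, [], t ++ [String.ofList ('"' :: (mid ++ ['"']))]) := by
            simp [tokBstep, hcp]
          rw [hstep2, ← ih (p + 1) _ (by omega)]
      · rw [dif_neg hq]
        by_cases hs : PySem.Chars.isspace cs[i] = true
        · rw [dif_pos hs, hdrop, finB_cons]
          have hstep : tokBstep (0, [], t) cs[i] = (0, [], t) := by
            simp [tokBstep, hq, hs]
          rw [hstep, ih (i + 1) t (by omega)]
        · rw [dif_neg hs]
          simp only []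
          set w := tokAword cs i with hw
          have hwstep : w = tokAword cs (i + 1) := tokAword_step cs i h hs hq
          obtain ⟨h1, h2, h3⟩ := tokAword_spec cs (i + 1) h
          rw [← hwstep] at h1 h2 h3
          have hiw : i + 1 ≤ w := by rw [hwstep]; exact tokAword_ge cs (i + 1)
          set m := w - (i + 1) with hm
          set mid := (cs.drop (i + 1)).take m with hmid
          have hmidlen : mid.length = m := by simp [hmid]; omega
          have hmidok : ∀ ch ∈ mid, ¬ PySem.Chars.isspace ch = true ∧ ch ≠ '"' := by
            intro ch hch
            obtain ⟨j, hj, rfl⟩ := List.mem_iff_getElem.mp hch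
            have hjm : j < m := by omega
            have hh : mid[j] = cs[i + 1 + j]'(by omega) := by simp [hmid]
            rw [hh]
            exact h2 (i + 1 + j) (by omega) (by omega) (by omega)
          have hdec : cs.drop (i + 1) = mid ++ cs.drop w := by
            have hx : mid ++ (cs.drop (i + 1)).drop m = cs.drop (i + 1) :=
              List.take_append_drop m _
            rw [List.drop_drop] at hx
            have h2' : i + 1 + m = w := by omega
            rw [h2'] at hx
            exact hx.symm
          have hsl : PySem.List.slice cs (some (i : Int)) (some (w : Int)) =
              cs[i] :: mid := by
            rw [PySem.List.slice_natCast, hdrop]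
            have hnum : w - i = m + 1 := by omega
            rw [hnum, List.take_succ_cons]
          rw [hsl]
          rw [hdrop, finB_cons]
          have hstep : tokBstep (0, [], t) cs[i] = (2, [cs[i]], t) := by
            simp [tokBstep, hq, hs]
          rw [hstep, hdec, finB_append, foldl_mode2 _ _ _ hmidok]
          have htrans : finB (2, [cs[i]] ++ mid, t) (cs.drop w) =
              finB (0, [], t ++ [String.ofList (cs[i] :: mid)]) (cs.drop w) := by
            by_cases hwlen : w < cs.length
            · rw [List.drop_eq_getElem_cons hwlen, finB_cons, finB_cons]
              congr 1
              rcases h3 hwlen with hsp | hqq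
              · rw [getElem!_pos cs w hwlen] at hsp
                have hne : cs[w] ≠ '"' := by
                  intro hcontra
                  rw [hcontra] at hsp
                  simp [PySem.Chars.isspace] at hsp
                simp [tokBstep, hne, hsp]
              · rw [getElem!_pos cs w hwlen] at hqq
                simp [tokBstep, hqq]
            · rw [List.drop_eq_nil_of_le (by omega)]
              simp [finB]
          rw [htrans, ← ih w _ (by omega)]
    · rw [tokAloop, dif_neg h, List.drop_eq_nil_of_le (by omega)]
      simp [finB]

-- ===== VERDICT (by name: the statement is the Claim_ definition above) =====
theorem tokenize_query_py_spec : Claim_equal_tokenize_query_py := by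
  intro query _
  unfold Spec_tokenize_query_py tokenize_query_py tokenize_query_py_alt
  rw [main_lemma query.toList.length query.toList 0 [] (by omega)]
  simp [finB]
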